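-- pv_equiv track=rewrite | github.com/lanayam/Numeric-Ops-Simulator-440 | Midterm/Helper Functions/bitsfunc.py | equal_bits
-- ===== SOURCE A (Python) =====
-- def leftpad(b, n):
--     if len(b) >= n:
--         return b
--     return [0] * (n - len(b)) + b
--
-- def equal_bits(a , b):
--     n = max(len(a), len(b))
--     a_padded = leftpad(a, n)
--     b_padded = leftpad(b, n)
--     for x, y in zip(a_padded, b_padded):
--         if x != y:
--             return False
--     return True
-- ===== SOURCE B (Python) =====
-- def equal_bits(a, b):
--     # right-aligned comparison: no padded copies are built
--     if len(a) >= len(b):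
--         longer, shorter = a, b
--     else:
--         longer, shorter = b, a
--     d = len(longer) - len(shorter)
--     for bit in longer[:d]:
--         if bit != 0:
--             return False
--     for x, y in zip(reversed(longer), reversed(shorter)):
--         if x != y:
--             return False
--     return True
-- ===== Notes on version B (the rewrite author's own statement) =====
-- stated objective: alternative
-- what changed: B builds no padded copies: it checks the longer list's leading excess bits are zero and then compares the two lists right-aligned over their overlap via reversed iterators, instead of left-padding both lists and zipping the copies.
import Mathlib
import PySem

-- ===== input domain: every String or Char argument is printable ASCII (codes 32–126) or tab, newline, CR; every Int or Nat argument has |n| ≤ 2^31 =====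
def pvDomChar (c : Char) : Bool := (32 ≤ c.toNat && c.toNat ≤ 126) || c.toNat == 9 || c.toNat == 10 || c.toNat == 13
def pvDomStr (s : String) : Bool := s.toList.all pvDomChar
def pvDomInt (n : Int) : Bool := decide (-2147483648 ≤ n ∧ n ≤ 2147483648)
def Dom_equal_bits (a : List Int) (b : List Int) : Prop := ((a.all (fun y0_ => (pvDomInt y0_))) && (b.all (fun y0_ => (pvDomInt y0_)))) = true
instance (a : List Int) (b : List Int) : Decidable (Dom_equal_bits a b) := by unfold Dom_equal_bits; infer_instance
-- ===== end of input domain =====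

-- B differs from A by comparing right-aligned without building padded copies (alternative decomposition).

-- ===== PORT A =====
def leftpadA (b : List Int) (n : Nat) : List Int :=
  if b.length ≥ n then b
  else List.replicate (n - b.length) 0 ++ b

def zipEqA : List (Int × Int) → Bool
  | [] => true
  | (x, y) :: t => if x ≠ y then false else zipEqA t

def equal_bits (a : List Int) (b : List Int) : Bool :=
  let n := max a.length b.length
  let a_padded := leftpadA a n
  let b_padded := leftpadA b n
  zipEqA (a_padded.zip b_padded)

-- ===== PORT B =====
-- leading-excess loop of B: return False on the first nonzero bit
def leadZerosB : List Int → Bool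
  | [] => true
  | x :: t => if x ≠ 0 then false else leadZerosB t

-- right-aligned loop of B over zip(reversed(longer), reversed(shorter))
def revZipEqB : List (Int × Int) → Bool
  | [] => true
  | (x, y) :: t => if x ≠ y then false else revZipEqB t

def equal_bits_alt (a : List Int) (b : List Int) : Bool :=
  let p := if a.length ≥ b.length then (a, b) else (b, a)
  let longer := p.1
  let shorter := p.2
  let d := longer.length - shorter.length
  if leadZerosB (longer.take d) then
    revZipEqB (longer.reverse.zip shorter.reverse)
  else
    false

-- ===== PRECONDITION & SPEC =====
def Spec_equal_bits (a : List Int) (b : List Int) (out : Bool) : Prop := out = equal_bits_alt a b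
instance (a : List Int) (b : List Int) (out : Bool) : Decidable (Spec_equal_bits a b out) := by unfold Spec_equal_bits; infer_instance

-- ===== CLAIM (what is proved, stated in full; the proofs are below) =====
def Claim_equal_equal_bits : Prop := ∀ (a : List Int) (b : List Int), Dom_equal_bits a b → Spec_equal_bits a b (equal_bits a b)

-- ===== LEMMAS AND PROOFS =====

theorem zipEqA_eq_decide : ∀ (l1 l2 : List Int),
    zipEqA (l1.zip l2) = decide (l1.take l2.length = l2.take l1.length)
  | [], l2 => by simp [zipEqA]
  | x :: t1, [] => by simp [zipEqA]
  | x :: t1, y :: t2 => by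
    simp only [List.zip_cons_cons, zipEqA, List.length_cons, List.take_succ_cons]
    by_cases h : x = y
    · simp [h, zipEqA_eq_decide t1 t2]
    · simp [h]

theorem revZipEqB_eq_zipEqA : ∀ (p : List (Int × Int)), revZipEqB p = zipEqA p
  | [] => rfl
  | (x, y) :: t => by
    simp only [revZipEqB, zipEqA, revZipEqB_eq_zipEqA t]

theorem leadZerosB_eq_decide : ∀ (l : List Int),
    leadZerosB l = decide (∀ x ∈ l, x = 0)
  | [] => by simp [leadZerosB]
  | x :: t => by
    by_cases h : x = 0
    · simp [leadZerosB, h, leadZerosB_eq_decide t]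
    · simp [leadZerosB, h]

theorem leftpadA_eq (l : List Int) (n : Nat) :
    leftpadA l n = List.replicate (n - l.length) 0 ++ l := by
  unfold leftpadA
  split
  · next h => simp [Nat.sub_eq_zero_of_le h]
  · rfl

-- the core: both programs decide the same equation, proved for longer-first order
theorem main_le (a b : List Int) (h : b.length ≤ a.length) :
    equal_bits a b = (if leadZerosB (a.take (a.length - b.length)) then
      revZipEqB (a.reverse.zip b.reverse) else false) := by
  have hn : max a.length b.length = a.length := Nat.max_eq_left h
  have hlen : (List.replicate (a.length - b.length) (0 : Int) ++ b).length = a.length := by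
    simp [Nat.sub_add_cancel h]
  have hA : equal_bits a b
      = decide (a = List.replicate (a.length - b.length) 0 ++ b) := by
    simp only [equal_bits, leftpadA_eq, hn, Nat.sub_self, List.replicate_zero,
      List.nil_append]
    rw [zipEqA_eq_decide, hlen, List.take_length,
      List.take_of_length_le (le_of_eq hlen)]
  rw [hA, revZipEqB_eq_zipEqA, zipEqA_eq_decide, leadZerosB_eq_decide]
  have hrev : a.reverse.take b.reverse.length = (a.drop (a.length - b.length)).reverse := by
    rw [List.length_reverse, List.take_reverse]
  have hrev2 : b.reverse.take a.reverse.length = b.reverse := by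
    rw [List.take_of_length_le]
    simp [h]
  rw [hrev, hrev2]
  by_cases hz : ∀ x ∈ a.take (a.length - b.length), x = 0
  · rw [if_pos (by simpa using hz)]
    simp only [decide_eq_decide, List.reverse_inj]
    have htk : a.take (a.length - b.length) = List.replicate (a.length - b.length) 0 := by
      have h2 := List.eq_replicate_of_mem hz
      rwa [List.length_take, Nat.min_eq_left (Nat.sub_le _ _)] at h2
    constructor
    · intro he
      rw [he]
      simp
    · intro he
      conv_lhs => rw [← List.take_append_drop (a.length - b.length) a]
      rw [htk, he]
  · rw [if_neg (by simpa using hz)]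
    simp only [decide_eq_false_iff_not]
    intro he
    apply hz
    intro x hx
    have h2 := congrArg (List.take (a.length - b.length)) he
    rw [List.take_append_of_le_length (by simp), List.take_replicate,
      Nat.min_self] at h2
    rw [h2] at hx
    exact List.eq_of_mem_replicate hx

theorem zipEqA_swap : ∀ (p : List (Int × Int)), zipEqA (p.map Prod.swap) = zipEqA p
  | [] => rfl
  | (x, y) :: t => by
    simp only [List.map_cons, Prod.swap_prod_mk, zipEqA, ne_eq]
    by_cases hxy : x = y
    · simp [hxy, zipEqA_swap t]
    · have hyx : ¬y = x := fun h => hxy h.symm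
      simp [hxy, hyx]

theorem equal_bits_symm (a b : List Int) : equal_bits a b = equal_bits b a := by
  simp only [equal_bits, Nat.max_comm a.length b.length]
  generalize leftpadA a (max b.length a.length) = pa
  generalize leftpadA b (max b.length a.length) = pb
  rw [← List.zip_swap pb pa, zipEqA_swap]

-- ===== VERDICT (by name: the statement is the Claim_ definition above) =====
theorem equal_bits_spec : Claim_equal_equal_bits := by
  intro a b _
  unfold Spec_equal_bits equal_bits_alt
  by_cases h : a.length ≥ b.length
  · simp only [h, if_pos]
    exact main_le a b h
  · have h' : a.length ≤ b.length := Nat.le_of_not_le h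
    simp only [h, if_neg, not_false_iff]
    rw [equal_bits_symm]
    exact main_le b a h'
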